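-- pv_equiv track=rewrite | github.com/OCIoficial/2022-11-Final | cuatro/solutions/partial/ralonso_wrong_assumption.py | get_fours
-- ===== SOURCE A (Python) =====
-- def get_fours(grid, glyph):
--     n = len(grid)
--     rows = 0
--     cols = 0
--     for i in range(n):
--         r_count = 0
--         c_count = 0
--         for j in range(n):
--             if grid[i][j] == glyph:
--                 r_count += 1
--                 if r_count == 4:
--                     rows += 1
--                     r_count = 0
--             else:
--                 r_count = 0
--             if grid[j][i] == glyph:
--                 c_count += 1
--                 if c_count == 4:
--                     cols += 1
--                     c_count = 0
--             else:
--                 c_count = 0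
--     return max(rows, cols)
-- ===== SOURCE B (Python) =====
-- def _line(cells, glyph):
--     total = 0
--     i = 0
--     m = len(cells)
--     while i < m:
--         if cells[i] != glyph:
--             i += 1
--             continue
--         j = i
--         while j < m and cells[j] == glyph:
--             j += 1
--         total += (j - i) // 4
--         i = j
--     return total
--
--
-- def get_fours(grid, glyph):
--     n = len(grid)
--     rows = sum(_line([grid[i][j] for j in range(n)], glyph) for i in range(n))
--     cols = sum(_line([grid[j][i] for j in range(n)], glyph) for i in range(n))
--     return max(rows, cols)
-- ===== Notes on version B (the rewrite author's own statement) =====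
-- stated objective: alternative
-- what changed: Replaces the single interleaved loop with a reset-at-4 stateful counter by extracting each row and column as a line and summing floor(run_length/4) over its maximal runs of the glyph, found by run-skipping scans.
import Mathlib
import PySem

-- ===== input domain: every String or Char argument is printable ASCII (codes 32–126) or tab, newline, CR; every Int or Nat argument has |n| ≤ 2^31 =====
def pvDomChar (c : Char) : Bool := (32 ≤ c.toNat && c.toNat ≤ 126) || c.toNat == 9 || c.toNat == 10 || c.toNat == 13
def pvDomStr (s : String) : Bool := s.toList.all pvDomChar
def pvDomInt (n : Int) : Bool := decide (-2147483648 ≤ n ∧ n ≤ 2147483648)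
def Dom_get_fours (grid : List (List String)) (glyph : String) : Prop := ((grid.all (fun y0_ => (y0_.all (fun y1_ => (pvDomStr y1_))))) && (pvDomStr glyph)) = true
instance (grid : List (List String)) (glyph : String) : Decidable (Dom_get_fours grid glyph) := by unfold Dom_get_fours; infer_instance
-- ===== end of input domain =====

-- B replaces A's interleaved stateful reset-at-4 counter by extracting each row/column
-- as a line and summing floor(run/4) over maximal glyph runs (alternative decomposition).

-- Reading a cell; exact for in-range indices (Pre_ guarantees both Pythons stay in range).
def pvCell (grid : List (List String)) (i j : Nat) : String :=
  (grid.getD i []).getD j ""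

-- ===== PORT A =====
-- one step of Python's "count += 1; if count == 4: total += 1; count = 0 / else count = 0"
def pvLineStep (glyph : String) (s : Int × Int) (x : String) : Int × Int :=
  if x == glyph then
    if s.1 + 1 == 4 then (0, s.2 + 1) else (s.1 + 1, s.2)
  else (0, s.2)

def get_fours (grid : List (List String)) (glyph : String) : Int :=
  let n := grid.length
  let res := (List.range n).foldl (fun (st : Int × Int) i =>
      let inner := (List.range n).foldl
        (fun (s : (Int × Int) × (Int × Int)) j =>
          (pvLineStep glyph s.1 (pvCell grid i j), pvLineStep glyph s.2 (pvCell grid j i)))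
        ((0, st.1), (0, st.2))
      (inner.1.2, inner.2.2)) (0, 0)
  max res.1 res.2

-- ===== PORT B =====
-- Source B's _line: skip non-glyph cells; at a glyph, measure the maximal run, add run//4, jump past it
def pvLineRuns (glyph : String) : List String → Int
  | [] => 0
  | x :: xs =>
    if x == glyph then
      ((1 + (xs.takeWhile (· == glyph)).length : Int)) / 4
        + pvLineRuns glyph (xs.dropWhile (· == glyph))
    else pvLineRuns glyph xs
termination_by cells => cells.length
decreasing_by
  · simp only [List.length_cons]
    exact Nat.lt_succ_of_le (List.length_dropWhile_le _ _)
  · simp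

def get_fours_alt (grid : List (List String)) (glyph : String) : Int :=
  let n := grid.length
  let rows := ((List.range n).map
    (fun i => pvLineRuns glyph ((List.range n).map (fun j => pvCell grid i j)))).sum
  let cols := ((List.range n).map
    (fun i => pvLineRuns glyph ((List.range n).map (fun j => pvCell grid j i)))).sum
  max rows cols

-- ===== PRECONDITION & SPEC =====
-- Pre_ excludes exactly the ragged grids (some row shorter than the grid) on which both
-- Python A and Python B raise IndexError.
def Pre_get_fours (grid : List (List String)) (glyph : String) : Prop :=
  ∀ row ∈ grid, grid.length ≤ row.length
instance (grid : List (List String)) (glyph : String) : Decidable (Pre_get_fours grid glyph) := by unfold Pre_get_fours; infer_instance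
def pvWitness_get_fours : List (List String) × String := ([["x", "x"], ["x", "o"]], "x")

def Spec_get_fours (grid : List (List String)) (glyph : String) (out : Int) : Prop := out = get_fours_alt grid glyph
instance (grid : List (List String)) (glyph : String) (out : Int) : Decidable (Spec_get_fours grid glyph out) := by unfold Spec_get_fours; infer_instance

-- ===== CLAIM (what is proved, stated in full; the proofs are below) =====
def Claim_equal_get_fours : Prop := ∀ (grid : List (List String)) (glyph : String), Dom_get_fours grid glyph → Pre_get_fours grid glyph → Spec_get_fours grid glyph (get_fours grid glyph)

-- ===== LEMMAS AND PROOFS =====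

-- run-splitting characterisation of pvLineRuns
theorem pvLineRuns_split (glyph : String) (cells : List String) :
    pvLineRuns glyph cells
      = ((cells.takeWhile (· == glyph)).length : Int) / 4
        + pvLineRuns glyph (cells.dropWhile (· == glyph)) := by
  cases cells with
  | nil => simp [pvLineRuns]
  | cons x xs =>
    by_cases hx : (x == glyph) = true
    · simp [pvLineRuns, hx, List.takeWhile_cons]
      ring
    · simp [pvLineRuns, hx]

-- the stateful counter over a line equals the run-based count
theorem line_fold_eq (glyph : String) (cells : List String) :
    ∀ (c acc : Int), 0 ≤ c → c < 4 →
      (cells.foldl (pvLineStep glyph) (c, acc)).2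
        = acc + (c + ((cells.takeWhile (· == glyph)).length : Int)) / 4
            + pvLineRuns glyph (cells.dropWhile (· == glyph)) := by
  induction cells with
  | nil =>
    intro c acc h0 h4
    simp [pvLineRuns]
    omega
  | cons x xs ih =>
    intro c acc h0 h4
    by_cases hx : (x == glyph) = true
    · by_cases hc : c + 1 = 4
      · have : (List.foldl (pvLineStep glyph) (c, acc) (x :: xs)).2
            = (List.foldl (pvLineStep glyph) (0, acc + 1) xs).2 := by
          simp [pvLineStep, hx, hc]
        rw [this, ih 0 (acc + 1) le_rfl (by norm_num)]
        simp [hx]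
        generalize pvLineRuns glyph (List.dropWhile (fun x => x == glyph) xs) = R
        generalize ((List.takeWhile (fun x => x == glyph) xs).length : Int) = t
        omega
      · have : (List.foldl (pvLineStep glyph) (c, acc) (x :: xs)).2
            = (List.foldl (pvLineStep glyph) (c + 1, acc) xs).2 := by
          simp [pvLineStep, hx, hc]
        rw [this, ih (c + 1) acc (by omega) (by omega)]
        simp [hx]
        generalize pvLineRuns glyph (List.dropWhile (fun x => x == glyph) xs) = R
        generalize ht : ((List.takeWhile (fun x => x == glyph) xs).length : Int) = t
        omega
    · have : (List.foldl (pvLineStep glyph) (c, acc) (x :: xs)).2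
          = (List.foldl (pvLineStep glyph) (0, acc) xs).2 := by
        simp [pvLineStep, hx]
      rw [this, ih 0 acc le_rfl (by norm_num)]
      simp [hx, pvLineRuns, pvLineRuns_split glyph xs]
      generalize pvLineRuns glyph (List.dropWhile (fun x => x == glyph) xs) = R
      omega

theorem line_fold_runs (glyph : String) (cells : List String) (acc : Int) :
    (cells.foldl (pvLineStep glyph) (0, acc)).2 = acc + pvLineRuns glyph cells := by
  rw [line_fold_eq glyph cells 0 acc le_rfl (by norm_num), pvLineRuns_split glyph cells]
  generalize pvLineRuns glyph (List.dropWhile (fun x => x == glyph) cells) = R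
  generalize ((List.takeWhile (fun x => x == glyph) cells).length : Int) = t
  omega

-- the interleaved fold splits into two independent folds
theorem fold_interleave (glyph : String) (f g : Nat → String) :
    ∀ (l : List Nat) (a b : Int × Int),
      l.foldl (fun s j => (pvLineStep glyph s.1 (f j), pvLineStep glyph s.2 (g j))) (a, b)
        = (l.foldl (fun s j => pvLineStep glyph s (f j)) a,
           l.foldl (fun s j => pvLineStep glyph s (g j)) b) := by
  intro l
  induction l with
  | nil => intro a b; rfl
  | cons x xs ih => intro a b; simp [List.foldl_cons, ih]

-- pair fold adding independent quantities = pair of sums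
theorem fold_pair_sum (F G : Nat → Int) :
    ∀ (l : List Nat) (a b : Int),
      l.foldl (fun (st : Int × Int) i => (st.1 + F i, st.2 + G i)) (a, b)
        = (a + (l.map F).sum, b + (l.map G).sum) := by
  intro l
  induction l with
  | nil => intro a b; simp
  | cons x xs ih => intro a b; simp [List.foldl_cons, ih]; constructor <;> ring

-- ===== VERDICT (by name: the statement is the Claim_ definition above) =====
theorem get_fours_spec : Claim_equal_get_fours := by
  intro grid glyph _ _
  unfold Spec_get_fours get_fours get_fours_alt
  have hstep : ∀ (st : Int × Int) (i : Nat),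
      (let inner := (List.range grid.length).foldl
          (fun (s : (Int × Int) × (Int × Int)) j =>
            (pvLineStep glyph s.1 (pvCell grid i j), pvLineStep glyph s.2 (pvCell grid j i)))
          ((0, st.1), (0, st.2))
       ((inner.1.2, inner.2.2) : Int × Int))
        = (st.1 + pvLineRuns glyph ((List.range grid.length).map (fun j => pvCell grid i j)),
           st.2 + pvLineRuns glyph ((List.range grid.length).map (fun j => pvCell grid j i))) := by
    intro st i
    simp only [fold_interleave]
    have h1 := line_fold_runs glyph ((List.range grid.length).map (fun j => pvCell grid i j)) st.1
    have h2 := line_fold_runs glyph ((List.range grid.length).map (fun j => pvCell grid j i)) st.2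
    rw [List.foldl_map] at h1 h2
    simp only [h1, h2]
  simp only [hstep, fold_pair_sum]
  simp
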